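-- pv_equiv track=rewrite | github.com/jerry-eldridge/pyjgeutil3 | samples4/MusicModel_B/simple_music_model2.py | process8
-- ===== SOURCE A (Python) =====
-- def process8(m,r):
--     s = m
--     s2 = s.replace('\n',' ')
--     song = list(map(int,s2.strip().split(' ')))
--     ctl = [130,140]
--     song2 = []
--     memory = [1] # key
--     for i in range(len(song)):
--         v = song[i]
--         if v in ctl:
--             song2.append(v)
--             continue
--         if v in range(1,12+1):
--             w = v - memory[0]
--             memory[0] = v
--             song2.append(w)
--     s3 = ' '.join(list(map(str,song2)))
--
--     s = r
--     s4 = s.replace('\n',' ')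
--     return s3,s4
-- ===== SOURCE B (Python) =====
-- def process8(m, r):
--     toks = m.replace('\n', ' ').strip().split(' ')
--     song = [int(t) for t in toks]
--     pitches = [v for v in song if 1 <= v <= 12]
--     intervals = iter([b - a for a, b in zip([1] + pitches, pitches)])
--     out = []
--     for v in song:
--         if v in (130, 140):
--             out.append(str(v))
--         elif 1 <= v <= 12:
--             out.append(str(next(intervals)))
--     return ' '.join(out), r.replace('\n', ' ')
-- ===== Notes on version B (the rewrite author's own statement) =====
-- stated objective: alternative
-- what changed: A computes each interval inside one stateful loop with a memory cell; B first extracts the pitch tokens and computes all intervals in one shot from consecutive-pitch pairs (zip with a leading key 1), then interleaves them with the control codes in a separate pass over the tokens.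
import Mathlib
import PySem

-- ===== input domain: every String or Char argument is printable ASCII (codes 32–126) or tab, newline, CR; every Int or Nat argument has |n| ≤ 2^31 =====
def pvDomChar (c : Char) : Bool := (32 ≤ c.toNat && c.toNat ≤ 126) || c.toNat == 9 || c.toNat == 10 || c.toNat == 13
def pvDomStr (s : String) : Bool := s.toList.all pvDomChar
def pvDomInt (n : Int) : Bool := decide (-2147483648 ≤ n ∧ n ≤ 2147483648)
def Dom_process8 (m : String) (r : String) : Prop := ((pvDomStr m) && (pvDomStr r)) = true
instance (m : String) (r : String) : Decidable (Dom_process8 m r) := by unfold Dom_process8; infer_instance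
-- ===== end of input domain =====

-- B is an 'alternative' decomposition (same cost): intervals are computed in one shot from the
-- list of pitch tokens, then interleaved with the control codes in a separate pass.

-- ===== PORT A =====
-- the parsed token list (shared shape of both Pythons' first lines)
def pvToks (m : String) : List String :=
  (PySem.Str.split? (PySem.Str.strip (PySem.Str.replace m "\n" " ")) " ").getD []

-- song = list(map(int, …)); under Pre_ every token parses (getD 0 is never taken there)
def pvSong (m : String) : List Int :=
  (pvToks m).map (fun t => (PySem.Int.ofStr? t).getD 0)

-- A's single loop: state (song2, memory[0])
def process8 (m : String) (r : String) : String × String :=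
  let song := pvSong m
  let st := song.foldl
    (fun (st : List Int × Int) v =>
      if v = 130 ∨ v = 140 then (st.1 ++ [v], st.2)
      else if 1 ≤ v ∧ v ≤ 12 then (st.1 ++ [v - st.2], v)
      else st)
    ([], 1)
  let s3 := PySem.Str.join " " (st.1.map PySem.Int.toStr)
  (s3, PySem.Str.replace r "\n" " ")

-- ===== PORT B =====
-- second pass of B: control codes emitted directly, each pitch token consumes one interval
-- (the empty-iterator branch is a totality guard only; the interval list always has one entry per pitch)
def pvEmit : List Int → List Int → List String
  | [], _ => []
  | v :: vs, ivs =>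
    if v = 130 ∨ v = 140 then PySem.Int.toStr v :: pvEmit vs ivs
    else if 1 ≤ v ∧ v ≤ 12 then
      match ivs with
      | i :: rest => PySem.Int.toStr i :: pvEmit vs rest
      | [] => pvEmit vs []
    else pvEmit vs ivs

def process8_alt (m : String) (r : String) : String × String :=
  let song := pvSong m
  let pitches := song.filter (fun v => decide (1 ≤ v ∧ v ≤ 12))
  let intervals := (List.zip (1 :: pitches) pitches).map (fun p => p.2 - p.1)
  (PySem.Str.join " " (pvEmit song intervals), PySem.Str.replace r "\n" " ")

-- ===== PRECONDITION & SPEC =====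
-- Pre_: every whitespace token of m parses as a Python int (else A's map(int, …) raises ValueError,
-- e.g. on the empty string or on consecutive spaces)
def Pre_process8 (m : String) (r : String) : Prop :=
  ∀ t ∈ pvToks m, (PySem.Int.ofStr? t).isSome = true
instance (m : String) (r : String) : Decidable (Pre_process8 m r) := by unfold Pre_process8; infer_instance

def pvWitness_process8 : String × String := ("1 3 130 5\n12 140 2", "x\ny")

def Spec_process8 (m : String) (r : String) (out : String × String) : Prop := out = process8_alt m r
instance (m : String) (r : String) (out : String × String) : Decidable (Spec_process8 m r out) := by unfold Spec_process8; infer_instance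

-- ===== CLAIM (what is proved, stated in full; the proofs are below) =====
def Claim_equal_process8 : Prop := ∀ (m : String) (r : String), Dom_process8 m r → Pre_process8 m r → Spec_process8 m r (process8 m r)

-- ===== LEMMAS AND PROOFS =====

-- A's loop output as a structural recursion (the tail appended for the remaining tokens, key k)
def pvProcA : List Int → Int → List Int
  | [], _ => []
  | v :: vs, k =>
    if v = 130 ∨ v = 140 then v :: pvProcA vs k
    else if 1 ≤ v ∧ v ≤ 12 then (v - k) :: pvProcA vs v
    else pvProcA vs k

-- B's interval list for remaining tokens, key k
def pvIvs (vs : List Int) (k : Int) : List Int :=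
  (List.zip (k :: vs.filter (fun v => decide (1 ≤ v ∧ v ≤ 12)))
            (vs.filter (fun v => decide (1 ≤ v ∧ v ≤ 12)))).map (fun p => p.2 - p.1)

theorem pvFoldA (vs : List Int) (acc : List Int) (k : Int) :
    (vs.foldl
      (fun (st : List Int × Int) v =>
        if v = 130 ∨ v = 140 then (st.1 ++ [v], st.2)
        else if 1 ≤ v ∧ v ≤ 12 then (st.1 ++ [v - st.2], v)
        else st)
      (acc, k)).1 = acc ++ pvProcA vs k := by
  induction vs generalizing acc k with
  | nil => simp [pvProcA]
  | cons v vs ih =>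
    simp only [List.foldl_cons, pvProcA]
    by_cases h1 : v = 130 ∨ v = 140
    · simp [h1, ih]
    · by_cases h2 : 1 ≤ v ∧ v ≤ 12
      · simp [h1, h2, ih]
      · simp [h1, h2, ih]

theorem pvMain (vs : List Int) (k : Int) :
    (pvProcA vs k).map PySem.Int.toStr = pvEmit vs (pvIvs vs k) := by
  induction vs generalizing k with
  | nil => simp [pvProcA, pvEmit]
  | cons v vs ih =>
    by_cases h1 : v = 130 ∨ v = 140
    · have hnp : ¬ (1 ≤ v ∧ v ≤ 12) := by rcases h1 with h | h <;> omega
      have hf : (v :: vs).filter (fun v => decide (1 ≤ v ∧ v ≤ 12))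
          = vs.filter (fun v => decide (1 ≤ v ∧ v ≤ 12)) := by
        simp [hnp]
      have hiv : pvIvs (v :: vs) k = pvIvs vs k := by
        simp only [pvIvs, hf]
      rw [show pvProcA (v :: vs) k = v :: pvProcA vs k from by simp [pvProcA, h1],
          hiv, show pvEmit (v :: vs) (pvIvs vs k) = PySem.Int.toStr v :: pvEmit vs (pvIvs vs k)
            from by simp [pvEmit, h1],
          List.map_cons, ih]
    · by_cases h2 : 1 ≤ v ∧ v ≤ 12
      · have hf : (v :: vs).filter (fun v => decide (1 ≤ v ∧ v ≤ 12))
            = v :: vs.filter (fun v => decide (1 ≤ v ∧ v ≤ 12)) := by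
          simp [h2]
        have hiv : pvIvs (v :: vs) k = (v - k) :: pvIvs vs v := by
          simp only [pvIvs, hf, List.zip_cons_cons, List.map_cons]
        rw [show pvProcA (v :: vs) k = (v - k) :: pvProcA vs v from by simp [pvProcA, h1, h2],
            hiv, show pvEmit (v :: vs) ((v - k) :: pvIvs vs v)
              = PySem.Int.toStr (v - k) :: pvEmit vs (pvIvs vs v) from by simp [pvEmit, h1, h2],
            List.map_cons, ih]
      · have hf : (v :: vs).filter (fun v => decide (1 ≤ v ∧ v ≤ 12))
            = vs.filter (fun v => decide (1 ≤ v ∧ v ≤ 12)) := by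
          simp [h2]
        have hiv : pvIvs (v :: vs) k = pvIvs vs k := by
          simp only [pvIvs, hf]
        rw [show pvProcA (v :: vs) k = pvProcA vs k from by simp [pvProcA, h1, h2],
            hiv, show pvEmit (v :: vs) (pvIvs vs k) = pvEmit vs (pvIvs vs k)
              from by simp [pvEmit, h1, h2],
            ih]

-- ===== VERDICT (by name: the statement is the Claim_ definition above) =====
theorem process8_spec : Claim_equal_process8 := by
  intro m r _ _
  unfold Spec_process8 process8 process8_alt
  simp only
  rw [pvFoldA, List.nil_append, pvMain]
  rfl
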